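-- pv_equiv track=rewrite | github.com/vanyamel/OGKG | task1.py | locate_point_in_chain
-- ===== SOURCE A (Python) =====
-- def locate_point_in_chain(chain, point):
--     low, high = 0, len(chain) - 1
--     while low < high:
--         mid = (low + high) // 2
--         if chain[mid][1] <= point[1] <= chain[mid + 1][1]:
--             return mid
--         elif point[1] < chain[mid][1]:
--             high = mid
--         else:
--             low = mid + 1
--     return low
-- ===== SOURCE B (Python) =====
-- def locate_point_in_chain(chain, point):
--     y = point[1]
--
--     def search(low, n):
--         # binary search over the window [low, low+n] kept as offset + length
--         if n == 0:
--             return low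
--         half = n // 2
--         mid = low + half
--         if chain[mid][1] <= y <= chain[mid + 1][1]:
--             return mid
--         if y < chain[mid][1]:
--             return search(low, half)
--         return search(mid + 1, n - half - 1)
--
--     return search(0, max(len(chain) - 1, 0))
-- ===== Notes on version B (the rewrite author's own statement) =====
-- stated objective: alternative
-- what changed: Replaces the iterative (low, high)-bounds while-loop with a recursive helper that carries the window as offset + length (low, n), splitting n into half and n-half-1; same comparison sequence, so identical results even on ties/unsorted chains.
import Mathlib
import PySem

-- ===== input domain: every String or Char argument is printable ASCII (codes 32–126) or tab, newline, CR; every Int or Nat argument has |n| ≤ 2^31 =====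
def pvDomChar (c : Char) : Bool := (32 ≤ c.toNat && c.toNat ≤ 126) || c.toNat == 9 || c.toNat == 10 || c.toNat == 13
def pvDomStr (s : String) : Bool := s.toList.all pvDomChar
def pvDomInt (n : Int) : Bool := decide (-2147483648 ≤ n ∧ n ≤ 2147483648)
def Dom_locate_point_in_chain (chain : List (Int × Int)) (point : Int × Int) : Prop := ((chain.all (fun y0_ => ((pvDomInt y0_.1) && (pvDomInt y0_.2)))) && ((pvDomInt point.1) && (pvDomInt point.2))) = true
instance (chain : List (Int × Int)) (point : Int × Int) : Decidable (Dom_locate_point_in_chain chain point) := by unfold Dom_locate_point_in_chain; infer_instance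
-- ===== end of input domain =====

-- B replaces the iterative (low, high)-bounds loop by a recursive offset+length window; alternative decomposition, same cost.
-- ===== PORT A =====
-- the while loop of A, state (low, high); chain[mid]/chain[mid+1] are always in range on A's calls, the `| _, _ =>` arm is unreachable
def pvLoopA (chain : List (Int × Int)) (point : Int × Int) (low high : Int) : Int :=
  if h : low < high then
    let mid := PySem.Int.floordiv (low + high) 2
    match PySem.List.pyGet? chain mid, PySem.List.pyGet? chain (mid + 1) with
    | some a, some b =>
      if a.2 ≤ point.2 ∧ point.2 ≤ b.2 then mid
      else if point.2 < a.2 then pvLoopA chain point low mid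
      else pvLoopA chain point (mid + 1) high
    | _, _ => low
  else low
termination_by (high - low).toNat
decreasing_by
  · have := (PySem.Int.floordiv_two_mid_bounds (le_of_lt h)).1
    have := PySem.Int.floordiv_eq_ediv_of_pos (a := low + high) (b := 2) (by omega)
    omega
  · have := (PySem.Int.floordiv_two_mid_bounds (le_of_lt h)).2
    have := PySem.Int.floordiv_eq_ediv_of_pos (a := low + high) (b := 2) (by omega)
    omega

def locate_point_in_chain (chain : List (Int × Int)) (point : Int × Int) : Int :=
  pvLoopA chain point 0 ((chain.length : Int) - 1)

-- ===== PORT B =====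
-- B's recursive helper: window [low, low+n] as offset `low` + length `n`
def pvSearchB (chain : List (Int × Int)) (y : Int) (low : Int) (n : Nat) : Int :=
  if hn : n = 0 then low
  else
    let half := n / 2
    let mid := low + (half : Int)
    match PySem.List.pyGet? chain mid, PySem.List.pyGet? chain (mid + 1) with
    | some a, some b =>
      if a.2 ≤ y ∧ y ≤ b.2 then mid
      else if y < a.2 then pvSearchB chain y low half
      else pvSearchB chain y (mid + 1) (n - half - 1)
    | _, _ => low
termination_by n
decreasing_by all_goals omega

def locate_point_in_chain_alt (chain : List (Int × Int)) (point : Int × Int) : Int :=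
  pvSearchB chain point.2 0 (max (chain.length - 1) 0)

-- ===== PRECONDITION & SPEC =====
def Spec_locate_point_in_chain (chain : List (Int × Int)) (point : Int × Int) (out : Int) : Prop := out = locate_point_in_chain_alt chain point
instance (chain : List (Int × Int)) (point : Int × Int) (out : Int) : Decidable (Spec_locate_point_in_chain chain point out) := by unfold Spec_locate_point_in_chain; infer_instance

-- ===== CLAIM (what is proved, stated in full; the proofs are below) =====
def Claim_equal_locate_point_in_chain : Prop := ∀ (chain : List (Int × Int)) (point : Int × Int), Dom_locate_point_in_chain chain point → Spec_locate_point_in_chain chain point (locate_point_in_chain chain point)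

-- ===== LEMMAS AND PROOFS =====

-- ===== VERDICT (by name: the statement is the Claim_ definition above) =====
-- invariant: A's loop on (low, low+n) computes B's recursion on (low, n)
theorem pvLoop_eq_search (chain : List (Int × Int)) (point : Int × Int) (n : Nat) :
    ∀ low : Int, pvLoopA chain point low (low + (n : Int)) = pvSearchB chain point.2 low n := by
  induction n using Nat.strong_induction_on with
  | _ n ih =>
    intro low
    rw [pvLoopA, pvSearchB]
    by_cases hn : n = 0
    · simp [hn]
    · have hlt : low < low + (n : Int) := by omega
      have hfd : PySem.Int.floordiv (low + (low + (n : Int))) 2 = (low + (low + (n : Int))) / 2 :=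
        PySem.Int.floordiv_eq_ediv_of_pos (by omega)
      have hmid : PySem.Int.floordiv (low + (low + (n : Int))) 2 = low + ((n / 2 : Nat) : Int) := by
        rw [hfd]; omega
      simp only [dif_pos hlt, dif_neg hn, hmid]
      have h2 := ih (n / 2) (by omega) low
      have h3 := ih (n - n / 2 - 1) (by omega) (low + ((n / 2 : Nat) : Int) + 1)
      have e3 : low + ((n / 2 : Nat) : Int) + 1 + ((n - n / 2 - 1 : Nat) : Int) = low + (n : Int) := by
        omega
      rw [e3] at h3
      cases PySem.List.pyGet? chain (low + ((n / 2 : Nat) : Int)) with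
      | none => simp
      | some a =>
        cases PySem.List.pyGet? chain (low + ((n / 2 : Nat) : Int) + 1) with
        | none => simp
        | some b =>
          have hc : ((n / 2 : Nat) : Int) = (n : Int) / 2 := by omega
          rw [hc] at h2 h3
          simp [h2, h3]

theorem locate_point_in_chain_spec : Claim_equal_locate_point_in_chain := by
  intro chain point _
  unfold Spec_locate_point_in_chain locate_point_in_chain locate_point_in_chain_alt
  have h := pvLoop_eq_search chain point (max (chain.length - 1) 0) 0
  have e : (0 : Int) + ((max (chain.length - 1) 0 : Nat) : Int) = (chain.length : Int) - 1 ∨ chain.length = 0 := by omega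
  rcases e with e | e
  · rw [← e]; simpa using h
  · simp [e, pvLoopA, pvSearchB]
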